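-- pv_equiv track=rewrite | github.com/Ezaaan/IF4071-Vowel-Speech-Recognition | Main.py | uniform_segmentation
-- ===== SOURCE A (Python) =====
-- def uniform_segmentation(data, k):
--     n = len(data)
--     segment_size = n // k
--     remainder = n % k
--
--     segments = []
--     points = []
--     start = 0
--     end = -1
--
--     for i in range(k):
--         if end >= 0:
--             points.append(end - 1)
--         end = start + segment_size + (1 if remainder > 0 else 0)
--         segments.append(data[start:end])
--         start = end
--         remainder -= 1
--
--     return segments, points
-- ===== SOURCE B (Python) =====
-- def uniform_segmentation(data, k):
--     n = len(data)
--     q, r = divmod(n, k)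
--     bounds = [0]
--     for i in range(k):
--         bounds.append(bounds[-1] + q + (1 if i < r else 0))
--     segments = [data[bounds[i]:bounds[i + 1]] for i in range(k)]
--     points = [bounds[i] - 1 for i in range(1, k)]
--     return segments, points
-- ===== Notes on version B (the rewrite author's own statement) =====
-- stated objective: alternative
-- what changed: Replaces A's single stateful loop (which interleaves appending segments with deferred boundary-point appends and a decrementing remainder) by two separate passes: first build a boundaries table b[0..k], then produce segments and points as independent comprehensions over that table.
-- outside the precondition, e.g. on uniform_segmentation([1, 2, 3], 0): A raises ZeroDivisionError, B raises ZeroDivisionError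
import Mathlib
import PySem

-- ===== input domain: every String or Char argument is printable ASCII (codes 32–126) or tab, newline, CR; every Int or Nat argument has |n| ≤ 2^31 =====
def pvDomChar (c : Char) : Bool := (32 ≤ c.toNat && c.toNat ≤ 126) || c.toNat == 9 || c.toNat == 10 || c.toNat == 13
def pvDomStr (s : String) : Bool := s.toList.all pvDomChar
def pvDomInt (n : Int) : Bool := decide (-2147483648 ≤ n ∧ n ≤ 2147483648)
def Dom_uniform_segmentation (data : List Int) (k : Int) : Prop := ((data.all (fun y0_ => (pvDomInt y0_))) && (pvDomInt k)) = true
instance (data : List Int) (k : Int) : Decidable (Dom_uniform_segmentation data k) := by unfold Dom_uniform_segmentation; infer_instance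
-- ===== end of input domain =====

-- B separates the index-table construction (a boundaries list) from the slicing:
-- two independent comprehension passes instead of A's single stateful loop; objective: alternative decomposition.

-- ===== PORT A =====
-- state: (segments, points, start, end_, remainder)
def uniform_segmentation (data : List Int) (k : Int) : List (List Int) × List Int :=
  let n : Int := (data.length : Int)
  let segment_size := PySem.Int.floordiv n k
  let remainder := PySem.Int.mod n k
  let st := (PySem.List.pyRange 0 k).foldl
    (fun (s : List (List Int) × List Int × Int × Int × Int) _i =>
      let points := if s.2.2.2.1 ≥ 0 then s.2.1 ++ [s.2.2.2.1 - 1] else s.2.1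
      let end_ := s.2.2.1 + segment_size + (if s.2.2.2.2 > 0 then 1 else 0)
      let segments := s.1 ++ [PySem.List.slice data (some s.2.2.1) (some end_)]
      (segments, points, end_, end_, s.2.2.2.2 - 1))
    ([], [], 0, -1, remainder)
  (st.1, st.2.1)

-- ===== PORT B =====
def uniform_segmentation_alt (data : List Int) (k : Int) : List (List Int) × List Int :=
  let n : Int := (data.length : Int)
  let q := PySem.Int.floordiv n k
  let r := PySem.Int.mod n k
  let bounds := (PySem.List.pyRange 0 k).foldl
    (fun bs i => bs ++ [PySem.List.pyGetD bs (-1) 0 + q + (if i < r then 1 else 0)]) [0]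
  let segments := (PySem.List.pyRange 0 k).map
    (fun i => PySem.List.slice data (some (PySem.List.pyGetD bounds i 0))
                                    (some (PySem.List.pyGetD bounds (i + 1) 0)))
  let points := (PySem.List.pyRange 1 k).map (fun i => PySem.List.pyGetD bounds i 0 - 1)
  (segments, points)

-- ===== PRECONDITION & SPEC =====
-- Pre_ excludes only k = 0, on which Python A raises ZeroDivisionError (n // k).
def Pre_uniform_segmentation (data : List Int) (k : Int) : Prop := k ≠ 0
instance (data : List Int) (k : Int) : Decidable (Pre_uniform_segmentation data k) := by
  unfold Pre_uniform_segmentation; infer_instance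
def pvWitness_uniform_segmentation : List Int × Int := ([1, 2, 3, 4, 5], 2)

def Spec_uniform_segmentation (data : List Int) (k : Int) (out : List (List Int) × List Int) : Prop := out = uniform_segmentation_alt data k
instance (data : List Int) (k : Int) (out : List (List Int) × List Int) : Decidable (Spec_uniform_segmentation data k out) := by unfold Spec_uniform_segmentation; infer_instance

-- ===== CLAIM (what is proved, stated in full; the proofs are below) =====
def Claim_equal_uniform_segmentation : Prop := ∀ (data : List Int) (k : Int), Dom_uniform_segmentation data k → Pre_uniform_segmentation data k → Spec_uniform_segmentation data k (uniform_segmentation data k)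

-- ===== LEMMAS AND PROOFS =====

-- the j-th segment boundary: j*q plus one extra for each of the first r segments
def pvBound (q r : Int) (j : Nat) : Int := q * j + min (j : Int) r

lemma pvBound_succ (q r : Int) (m : Nat) :
    pvBound q r (m + 1) = pvBound q r m + q + (if (m : Int) < r then 1 else 0) := by
  simp only [pvBound]
  push_cast
  have h : q * ((m : Int) + 1) = q * (m : Int) + q := by ring
  rw [h]
  split_ifs <;> omega

lemma pvBound_nonneg (q r : Int) (hq : 0 ≤ q) (hr : 0 ≤ r) (m : Nat) :
    0 ≤ pvBound q r m := by
  simp only [pvBound]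
  have h0 : (0 : Int) ≤ (m : Int) := Int.natCast_nonneg m
  have h1 : (0 : Int) ≤ q * (m : Int) := mul_nonneg hq h0
  have := le_min h0 hr
  omega

-- invariant of A's loop after m iterations
lemma pvLoopA (data : List Int) (q r : Int) (hq : 0 ≤ q) (hr : 0 ≤ r) (m : Nat) :
    (PySem.List.pyRange 0 (m : Int)).foldl
      (fun (s : List (List Int) × List Int × Int × Int × Int) _i =>
        let points := if s.2.2.2.1 ≥ 0 then s.2.1 ++ [s.2.2.2.1 - 1] else s.2.1
        let end_ := s.2.2.1 + q + (if s.2.2.2.2 > 0 then 1 else 0)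
        let segments := s.1 ++ [PySem.List.slice data (some s.2.2.1) (some end_)]
        (segments, points, end_, end_, s.2.2.2.2 - 1))
      ([], [], 0, -1, r) =
    ((List.range m).map (fun j =>
        PySem.List.slice data (some (pvBound q r j)) (some (pvBound q r (j + 1)))),
     (List.range (m - 1)).map (fun j => pvBound q r (j + 1) - 1),
     pvBound q r m, (if m = 0 then -1 else pvBound q r m), r - m) := by
  induction m with
  | zero =>
    simp [pvBound, min_eq_left hr]
  | succ m ih =>
    have hcast : ((m + 1 : Nat) : Int) = (m : Int) + 1 := by push_cast; ring
    rw [hcast, PySem.List.pyRange_one_succ_right (Int.natCast_nonneg m), List.foldl_append, ih]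
    simp only [List.foldl_cons, List.foldl_nil]
    have hstep2 : (pvBound q r m + q + if r - (m : Int) > 0 then 1 else 0) = pvBound q r (m + 1) := by
      rw [pvBound_succ]
      split_ifs <;> omega
    rw [hstep2]
    simp only [Prod.mk.injEq]
    refine ⟨?_, ?_, trivial, ?_, by omega⟩
    · rw [List.range_succ]; simp
    · cases m with
      | zero => simp
      | succ m' =>
        rw [if_neg (Nat.succ_ne_zero m'),
          if_pos (show pvBound q r (m' + 1) ≥ 0 from pvBound_nonneg q r hq hr (m' + 1)),
          show m' + 1 + 1 - 1 = m' + 1 from rfl, List.range_succ]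
        simp
    · rw [if_neg (Nat.succ_ne_zero m)]

-- invariant of B's bounds loop
lemma pvLoopB (q r : Int) (hr : 0 ≤ r) (m : Nat) :
    (PySem.List.pyRange 0 (m : Int)).foldl
      (fun bs i => bs ++ [PySem.List.pyGetD bs (-1) 0 + q + (if i < r then 1 else 0)]) [0] =
    (List.range (m + 1)).map (fun j => pvBound q r j) := by
  induction m with
  | zero =>
    simp [pvBound, min_eq_left hr]
  | succ m ih =>
    have hcast : ((m + 1 : Nat) : Int) = (m : Int) + 1 := by push_cast; ring
    rw [hcast, PySem.List.pyRange_one_succ_right (Int.natCast_nonneg m), List.foldl_append, ih]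
    simp only [List.foldl_cons, List.foldl_nil]
    rw [List.range_succ (n := m + 1), List.map_append]
    congr 1
    rw [List.range_succ (n := m), List.map_append]
    simp only [List.map_cons, List.map_nil]
    rw [PySem.List.pyGetD_neg_one_append_singleton]
    simp [pvBound_succ]

lemma pvGetD_map_range {α : Type} (f : Nat → α) (n j : Nat) (d : α) (h : j < n) :
    ((List.range n).map f).getD j d = f j := by
  rw [List.getD_eq_getElem?_getD]
  simp [List.getElem?_map, List.getElem?_range h]

-- ===== VERDICT (by name: the statement is the Claim_ definition above) =====
theorem uniform_segmentation_spec : Claim_equal_uniform_segmentation := by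
  intro data k _hdom hk
  show _ = _
  simp only [uniform_segmentation, uniform_segmentation_alt]
  rcases lt_or_gt_of_ne hk with hneg | hpos
  · -- k < 0 : all ranges are empty
    have h0 : PySem.List.pyRange 0 k = [] := by
      rw [PySem.List.pyRange_one, show (k - 0).toNat = 0 from by omega]
      rfl
    have h1 : PySem.List.pyRange 1 k = [] := by
      rw [PySem.List.pyRange_one, show (k - 1).toNat = 0 from by omega]
      rfl
    simp [h0, h1]
  · -- k > 0
    obtain ⟨K, rfl⟩ : ∃ K : Nat, k = (K : Int) := ⟨k.toNat, (Int.toNat_of_nonneg hpos.le).symm⟩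
    set q := PySem.Int.floordiv (data.length : Int) (K : Int) with hqdef
    set r := PySem.Int.mod (data.length : Int) (K : Int) with hrdef
    have hq : 0 ≤ q := by
      rw [hqdef, PySem.Int.floordiv_natCast]; exact Int.natCast_nonneg _
    have hr : 0 ≤ r := by
      rw [hrdef, PySem.Int.mod_natCast]; exact Int.natCast_nonneg _
    rw [pvLoopA data q r hq hr K, pvLoopB q r hr K]
    simp only [Prod.mk.injEq]
    constructor
    · -- segments agree
      rw [PySem.List.pyRange_zero_natCast, List.map_map]
      apply List.map_congr_left
      intro j hj
      have hjK : j < K := List.mem_range.mp hj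
      simp only [Function.comp]
      have h1 : ((j : Int) + 1) = ((j + 1 : Nat) : Int) := by push_cast; ring
      rw [h1, PySem.List.pyGetD_natCast, PySem.List.pyGetD_natCast,
        pvGetD_map_range _ _ _ _ (by omega), pvGetD_map_range _ _ _ _ (by omega)]
    · -- points agree
      rw [PySem.List.pyRange_one, show ((K : Int) - 1).toNat = K - 1 from by omega,
        List.map_map]
      apply List.map_congr_left
      intro j hj
      have hjK : j < K - 1 := List.mem_range.mp hj
      simp only [Function.comp]
      have h1 : (1 : Int) + (j : Int) = ((j + 1 : Nat) : Int) := by push_cast; ring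
      rw [h1, PySem.List.pyGetD_natCast, pvGetD_map_range _ _ _ _ (by omega)]
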